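-- pv_equiv track=rewrite | github.com/ZeCa-Caloo/TRANSFORMERSPDF | app2.py | strip_unsupported_at_rules
-- ===== SOURCE A (Python) =====
-- UNSUPPORTED_AT_RULES = ("@media", "@supports", "@keyframes", "@-webkit-", "@-moz-", "@-ms-")
--
-- def strip_unsupported_at_rules(css: str) -> str:
--     out, i = [], 0
--     while i < len(css):
--         if css[i] == "@" and any(css.startswith(x, i) for x in UNSUPPORTED_AT_RULES):
--             depth, j = 0, i
--             while j < len(css):
--                 if j < len(css) and css[j] == "{":
--                     depth += 1
--                 elif j < len(css) and css[j] == "}":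
--                     depth -= 1
--                     if depth <= 0:
--                         j += 1
--                         break
--                 j += 1
--             i = j
--             continue
--         out.append(css[i]); i += 1
--     return "".join(out)
-- ===== SOURCE B (Python) =====
-- UNSUPPORTED_AT_RULES = ("@media", "@supports", "@keyframes", "@-webkit-", "@-moz-", "@-ms-")
--
-- def strip_unsupported_at_rules(css: str) -> str:
--     out = []
--     skipping = False
--     depth = 0
--     for i, ch in enumerate(css):
--         if skipping:
--             if ch == "{":
--                 depth += 1
--             elif ch == "}":
--                 depth -= 1
--                 if depth <= 0:
--                     skipping = False
--         elif ch == "@" and css.startswith(UNSUPPORTED_AT_RULES, i):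
--             skipping, depth = True, 0
--         else:
--             out.append(ch)
--     return "".join(out)
-- ===== Notes on version B (the rewrite author's own statement) =====
-- stated objective: simpler
-- what changed: Replaces A's outer scan with a nested brace-matching inner loop by a single flat pass over the string carrying (skipping, depth) state.
import Mathlib
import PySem

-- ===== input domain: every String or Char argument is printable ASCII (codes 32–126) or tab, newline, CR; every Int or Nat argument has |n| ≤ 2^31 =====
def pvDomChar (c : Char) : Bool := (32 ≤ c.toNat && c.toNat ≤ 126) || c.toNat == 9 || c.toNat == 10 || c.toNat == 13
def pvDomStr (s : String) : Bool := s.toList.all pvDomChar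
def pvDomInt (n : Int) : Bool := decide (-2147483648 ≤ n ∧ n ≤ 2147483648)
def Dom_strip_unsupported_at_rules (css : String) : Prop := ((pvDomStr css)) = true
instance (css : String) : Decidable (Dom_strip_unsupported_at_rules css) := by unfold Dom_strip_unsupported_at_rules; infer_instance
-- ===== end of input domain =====

-- B replaces A's outer-scan-plus-inner-brace-matching nesting by one flat pass carrying
-- (skipping, depth) state; objective: simpler (same O(n) cost).


-- module-level constant UNSUPPORTED_AT_RULES (shared by both Pythons)
def pvUnsupportedAtRules : List (List Char) :=
  ["@media".toList, "@supports".toList, "@keyframes".toList,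
   "@-webkit-".toList, "@-moz-".toList, "@-ms-".toList]

-- any(css.startswith(x, i) …) on the suffix starting at i
def pvMatchesAt (l : List Char) : Bool := pvUnsupportedAtRules.any (fun p => p.isPrefixOf l)

-- ===== PORT A =====
-- A's inner 'while j < len(css)' brace-matching loop; the remaining suffix plays the role of index j,
-- and the returned suffix is the resume point i = j.
def pvInnerA : List Char → Int → List Char
  | [], _ => []
  | c :: rest, depth =>
    if c = '{' then pvInnerA rest (depth + 1)
    else if c = '}' then
      (if depth - 1 ≤ 0 then rest else pvInnerA rest (depth - 1))
    else pvInnerA rest depth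

theorem pvInnerA_length_le (l : List Char) (d : Int) : (pvInnerA l d).length ≤ l.length := by
  induction l generalizing d with
  | nil => simp [pvInnerA]
  | cons c rest ih =>
    simp only [pvInnerA]
    split_ifs <;> simp <;> exact Nat.le_succ_of_le (ih _)

-- A's outer 'while i < len(css)' loop; the remaining suffix plays the role of index i.
def pvOuterA : List Char → List Char
  | [] => []
  | c :: rest =>
    if c = '@' && pvMatchesAt (c :: rest) then pvOuterA (pvInnerA (c :: rest) 0)
    else c :: pvOuterA rest
termination_by l => l.length
decreasing_by
  · rename_i h
    have hc : c = '@' := by simpa using (Bool.and_elim_left h)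
    have : pvInnerA (c :: rest) 0 = pvInnerA rest 0 := by
      subst hc; simp [pvInnerA]
    rw [this]
    exact Nat.lt_succ_of_le (pvInnerA_length_le rest 0)
  · simp

def strip_unsupported_at_rules (css : String) : String :=
  String.ofList (pvOuterA css.toList)

-- ===== PORT B =====
-- B's single flat pass with carried state (skipping, depth)
def pvGoB : List Char → Bool → Int → List Char
  | [], _, _ => []
  | c :: rest, skipping, depth =>
    if skipping then
      if c = '{' then pvGoB rest true (depth + 1)
      else if c = '}' then
        (if depth - 1 ≤ 0 then pvGoB rest false 0 else pvGoB rest true (depth - 1))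
      else pvGoB rest true depth
    else
      if c = '@' && pvMatchesAt (c :: rest) then pvGoB rest true 0
      else c :: pvGoB rest false depth

def strip_unsupported_at_rules_alt (css : String) : String :=
  String.ofList (pvGoB css.toList false 0)

-- ===== PRECONDITION & SPEC =====
def Spec_strip_unsupported_at_rules (css : String) (out : String) : Prop := out = strip_unsupported_at_rules_alt css
instance (css : String) (out : String) : Decidable (Spec_strip_unsupported_at_rules css out) := by unfold Spec_strip_unsupported_at_rules; infer_instance

-- ===== CLAIM (what is proved, stated in full; the proofs are below) =====
def Claim_equal_strip_unsupported_at_rules : Prop := ∀ (css : String), Dom_strip_unsupported_at_rules css → Spec_strip_unsupported_at_rules css (strip_unsupported_at_rules css)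

-- ===== LEMMAS AND PROOFS =====

theorem pvGoB_eq_outerA (l : List Char) :
    (∀ d : Int, pvGoB l false d = pvOuterA l) ∧
    (∀ d : Int, pvGoB l true d = pvOuterA (pvInnerA l d)) := by
  induction l with
  | nil => simp [pvGoB, pvInnerA, pvOuterA]
  | cons c rest ih =>
    refine ⟨?_, ?_⟩
    · intro d
      by_cases h : (c = '@' && pvMatchesAt (c :: rest)) = true
      · have hc : c = '@' := by simpa using (Bool.and_elim_left h)
        have hin : pvInnerA (c :: rest) 0 = pvInnerA rest 0 := by
          subst hc; simp [pvInnerA]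
        rw [pvGoB, pvOuterA]
        simp only [h, if_true, hin]
        exact ih.2 0
      · rw [pvGoB, pvOuterA]
        simp only [h]
        simp only [Bool.false_eq_true, if_false]
        rw [ih.1 d]
    · intro d
      rw [pvGoB]
      simp only [if_true]
      by_cases h1 : c = '{'
      · simp only [h1, if_true, pvInnerA]
        exact ih.2 (d + 1)
      · by_cases h2 : c = '}'
        · simp only [h2, if_true, pvInnerA]
          by_cases h3 : d - 1 ≤ 0
          · simp only [h3, if_true]
            exact ih.1 0
          · simp only [h3, if_false]
            exact ih.2 (d - 1)
        · simp only [h1, h2, if_false, pvInnerA]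
          exact ih.2 d

-- ===== VERDICT (by name: the statement is the Claim_ definition above) =====
theorem strip_unsupported_at_rules_spec : Claim_equal_strip_unsupported_at_rules := by
  intro css _
  unfold Spec_strip_unsupported_at_rules strip_unsupported_at_rules strip_unsupported_at_rules_alt
  rw [(pvGoB_eq_outerA css.toList).1 0]
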